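-- pv_equiv track=rewrite | github.com/rdcorrales/CMSC-180 | LRP04/lab.py | split_matrix
-- ===== SOURCE A (Python) =====
-- def split_matrix(matrix, num_slaves):
--     n = len(matrix)
--     cols_per_submatrix = n // num_slaves
--     remainder_cols = n % num_slaves
--     submatrices = []
--
--     start_col = 0
--     for i in range(num_slaves):
--         extra_cols = 1 if i < remainder_cols else 0
--         end_col = start_col + cols_per_submatrix + extra_cols
--
--         submatrix = [row[start_col:end_col] for row in matrix]
--         submatrices.append(submatrix)
--
--         start_col = end_col
--
--     return submatrices
-- ===== SOURCE B (Python) =====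
-- def split_matrix(matrix, num_slaves):
--     # Peel off one block at a time: with k slaves left, the leading block
--     # always gets ceil(left / k) of the remaining columns; then trim the
--     # rows and continue on the rest.
--     rows, left = matrix, len(matrix)
--     out = []
--     for k in range(num_slaves, 0, -1):
--         w = (left + k - 1) // k
--         out.append([row[:w] for row in rows])
--         rows = [row[w:] for row in rows]
--         left -= w
--     return out
-- ===== Notes on version B (the rewrite author's own statement) =====
-- stated objective: alternative
-- what changed: B replaces the boundary-accumulating slicing loop by a peeling pass: with k slaves left it takes a leading block of ceil(left/k) of the remaining columns, trims those columns off the rows, and continues on the shrunken rows, never computing n//num_slaves, n%num_slaves or column offsets.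
import Mathlib
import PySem

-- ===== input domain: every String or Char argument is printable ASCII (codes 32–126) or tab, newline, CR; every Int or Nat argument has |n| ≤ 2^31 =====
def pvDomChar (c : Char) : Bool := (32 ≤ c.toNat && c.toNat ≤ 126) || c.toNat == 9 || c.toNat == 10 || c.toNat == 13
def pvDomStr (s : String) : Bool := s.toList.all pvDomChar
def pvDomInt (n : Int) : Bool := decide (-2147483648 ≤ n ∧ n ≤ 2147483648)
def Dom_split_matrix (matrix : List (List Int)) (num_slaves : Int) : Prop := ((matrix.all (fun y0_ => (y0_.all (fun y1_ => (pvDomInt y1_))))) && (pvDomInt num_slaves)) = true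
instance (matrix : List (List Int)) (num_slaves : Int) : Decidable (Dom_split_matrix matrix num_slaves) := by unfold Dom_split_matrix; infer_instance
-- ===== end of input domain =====

-- B peels off one leading block of ceil(left/k) remaining columns and recurses on the
-- column-trimmed rows, instead of A's boundary-accumulating loop (objective: alternative).

-- ===== PORT A =====
def split_matrix (matrix : List (List Int)) (num_slaves : Int) : List (List (List Int)) :=
  let n : Int := matrix.length
  let cols_per_submatrix := PySem.Int.floordiv n num_slaves
  let remainder_cols := PySem.Int.mod n num_slaves
  let st := (PySem.List.pyRange 0 num_slaves 1).foldl
    (fun (st : Int × List (List (List Int))) i =>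
      let extra_cols : Int := if i < remainder_cols then 1 else 0
      let end_col := st.1 + cols_per_submatrix + extra_cols
      let submatrix := matrix.map (fun row => PySem.List.slice row (some st.1) (some end_col))
      (end_col, st.2 ++ [submatrix]))
    (0, [])
  st.2

-- ===== PORT B =====
def split_matrix_alt (matrix : List (List Int)) (num_slaves : Int) : List (List (List Int)) :=
  let st := (PySem.List.pyRange num_slaves 0 (-1)).foldl
    (fun (st : List (List Int) × Int × List (List (List Int))) k =>
      let w := PySem.Int.floordiv (st.2.1 + k - 1) k
      (st.1.map (fun row => PySem.List.slice row (some w) none),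
       st.2.1 - w,
       st.2.2 ++ [st.1.map (fun row => PySem.List.slice row none (some w))]))
    (matrix, (matrix.length : Int), [])
  st.2.2

-- ===== PRECONDITION & SPEC =====
-- Pre_ excludes exactly num_slaves = 0, on which A raises ZeroDivisionError.
def Pre_split_matrix (matrix : List (List Int)) (num_slaves : Int) : Prop := num_slaves ≠ 0
instance (matrix : List (List Int)) (num_slaves : Int) : Decidable (Pre_split_matrix matrix num_slaves) := by unfold Pre_split_matrix; infer_instance
def pvWitness_split_matrix : List (List Int) × Int := ([[1, 2], [3, 4]], 2)

def Spec_split_matrix (matrix : List (List Int)) (num_slaves : Int) (out : List (List (List Int))) : Prop := out = split_matrix_alt matrix num_slaves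
instance (matrix : List (List Int)) (num_slaves : Int) (out : List (List (List Int))) : Decidable (Spec_split_matrix matrix num_slaves out) := by unfold Spec_split_matrix; infer_instance

-- ===== CLAIM (what is proved, stated in full; the proofs are below) =====
def Claim_equal_split_matrix : Prop := ∀ (matrix : List (List Int)) (num_slaves : Int), Dom_split_matrix matrix num_slaves → Pre_split_matrix matrix num_slaves → Spec_split_matrix matrix num_slaves (split_matrix matrix num_slaves)

-- ===== LEMMAS AND PROOFS =====

-- The block boundaries both programs realise.
def pvBound (cols rem i : Int) : Int := i * cols + min i rem

lemma pvBound_succ (cols rem i : Int) :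
    pvBound cols rem (i + 1) = pvBound cols rem i + cols + (if i < rem then 1 else 0) := by
  unfold pvBound
  rw [add_one_mul]
  split_ifs with h <;> simp [min_def] <;> split_ifs <;> omega

-- A's loop, started at boundary value pvBound cols rem a, appends exactly the blocks
-- [pvBound k, pvBound (k+1)) for k in range(a, b).
lemma pvLoop_inv (matrix : List (List Int)) (cols rem : Int)
    (a b : Int) (acc : List (List (List Int))) :
    ((PySem.List.pyRange a b 1).foldl
      (fun (st : Int × List (List (List Int))) i =>
        (st.1 + cols + (if i < rem then 1 else 0),
         st.2 ++ [List.map (fun row => PySem.List.slice row (some st.1)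
            (some (st.1 + cols + (if i < rem then 1 else 0)))) matrix]))
      (pvBound cols rem a, acc)).2
    = acc ++ (PySem.List.pyRange a b 1).map (fun k =>
        List.map (fun row =>
          PySem.List.slice row (some (pvBound cols rem k)) (some (pvBound cols rem (k + 1)))) matrix) := by
  by_cases hab : a < b
  · rw [PySem.List.pyRange_one_cons hab]
    simp only [List.foldl_cons, List.map_cons]
    rw [← pvBound_succ cols rem a]
    rw [pvLoop_inv matrix cols rem (a + 1) b (acc ++ [_])]
    simp
  · rw [PySem.List.pyRange_one_eq_nil (by omega)]
    simp
termination_by (b - a).toNat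
decreasing_by omega

-- The ceil width B computes from the remaining columns equals A's width of block i.
lemma pvCeil_width (n num s r i : Int) (hnum : 0 < num) (hi : 0 ≤ i) (hilt : i < num)
    (hsr : s * num + r = n) (hr0 : 0 ≤ r) (hrn : r < num) (hs0 : 0 ≤ s) :
    PySem.Int.floordiv (n - pvBound s r i + (num - i) - 1) (num - i)
      = s + (if i < r then 1 else 0) := by
  have hk : 0 < num - i := by omega
  rw [PySem.Int.floordiv_eq_iff_of_pos hk]
  have h1 : s * num = s * (num - i) + s * i := by ring
  have h4 : i * s = s * i := by ring
  unfold pvBound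
  by_cases hir : i < r
  · rw [if_pos hir, min_eq_left (by omega)]
    have h2 : (s + 1) * (num - i) = s * (num - i) + (num - i) := by ring
    have h3 : (s + 1 + 1) * (num - i) = s * (num - i) + 2 * (num - i) := by ring
    constructor <;> linarith
  · rw [if_neg hir, min_eq_right (by omega)]
    have h2 : (s + 0) * (num - i) = s * (num - i) := by ring
    have h3 : (s + 0 + 1) * (num - i) = s * (num - i) + (num - i) := by ring
    constructor <;> linarith

-- B's peeling loop, started on the rows with the first (pvBound i) columns dropped,
-- appends exactly blocks i, i+1, …, num-1.
lemma pvGoB_inv (matrix : List (List Int)) (n num s r : Int)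
    (hnum : 0 < num) (hsr : s * num + r = n) (hr0 : 0 ≤ r) (hrn : r < num) (hs0 : 0 ≤ s)
    (i : Int) (hi : 0 ≤ i) (hile : i ≤ num) (acc : List (List (List Int))) :
    ((PySem.List.pyRange (num - i) 0 (-1)).foldl
      (fun (st : List (List Int) × Int × List (List (List Int))) k =>
        let w := PySem.Int.floordiv (st.2.1 + k - 1) k
        (st.1.map (fun row => PySem.List.slice row (some w) none),
         st.2.1 - w,
         st.2.2 ++ [st.1.map (fun row => PySem.List.slice row none (some w))]))
      (matrix.map (fun row => row.drop (pvBound s r i).toNat), n - pvBound s r i, acc)).2.2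
    = acc ++ (PySem.List.pyRange i num 1).map (fun k =>
        List.map (fun row =>
          PySem.List.slice row (some (pvBound s r k)) (some (pvBound s r (k + 1)))) matrix) := by
  have hb0 : 0 ≤ pvBound s r i := by
    unfold pvBound
    have := mul_nonneg hi hs0
    omega
  by_cases hib : i < num
  · have hw := pvCeil_width n num s r i hnum hi hib hsr hr0 hrn hs0
    have hw0 : 0 ≤ s + (if i < r then 1 else 0) := by split_ifs <;> omega
    have hbsucc := pvBound_succ s r i
    have hb0' : 0 ≤ pvBound s r (i + 1) := by omega
    rw [PySem.List.pyRange_neg_one_cons (by omega : (0:Int) < num - i)]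
    simp only [List.foldl_cons, hw, List.map_map]
    have harg1 : List.map
        ((fun row => PySem.List.slice row (some (s + if i < r then 1 else 0)) none) ∘
          fun row => row.drop (pvBound s r i).toNat) matrix
        = List.map (fun row => row.drop (pvBound s r (i + 1)).toNat) matrix := by
      apply List.map_congr_left
      intro row _
      simp only [Function.comp_apply]
      rw [PySem.List.slice_from _ hw0, List.drop_drop]
      congr 1
      omega
    have harg2 : n - pvBound s r i - (s + if i < r then 1 else 0) = n - pvBound s r (i + 1) := by
      omega
    have hblock : List.map
        ((fun row => PySem.List.slice row none (some (s + if i < r then 1 else 0))) ∘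
          fun row => row.drop (pvBound s r i).toNat) matrix
        = List.map (fun row =>
            PySem.List.slice row (some (pvBound s r i)) (some (pvBound s r (i + 1)))) matrix := by
      apply List.map_congr_left
      intro row _
      simp only [Function.comp_apply]
      rw [PySem.List.slice_to _ hw0, PySem.List.slice_toNat _ hb0 hb0']
      congr 1
      omega
    have harg3 : num - i - 1 = num - (i + 1) := by omega
    rw [harg1, harg2, hblock, harg3,
        pvGoB_inv matrix n num s r hnum hsr hr0 hrn hs0 (i + 1) (by omega) (by omega)]
    rw [PySem.List.pyRange_one_cons hib, List.map_cons]
    simp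
  · rw [show num - i = 0 by omega, PySem.List.pyRange_neg_one_eq_nil (by omega),
        PySem.List.pyRange_one_eq_nil (by omega)]
    simp
termination_by (num - i).toNat
decreasing_by omega

-- ===== VERDICT (by name: the statement is the Claim_ definition above) =====
theorem split_matrix_spec : Claim_equal_split_matrix := by
  intro matrix num_slaves _ hpre
  unfold Spec_split_matrix
  simp only [split_matrix, split_matrix_alt]
  by_cases hpos : 0 < num_slaves
  · set n : Int := (matrix.length : Int) with hn
    set s := PySem.Int.floordiv n num_slaves with hs
    set r := PySem.Int.mod n num_slaves with hr
    have hsr : s * num_slaves + r = n := PySem.Int.floordiv_mul_add_mod n num_slaves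
    have hr0 : 0 ≤ r := by
      rw [hr, PySem.Int.mod_eq_emod_of_pos hpos]
      exact Int.emod_nonneg _ (by omega)
    have hrn : r < num_slaves := by
      rw [hr, PySem.Int.mod_eq_emod_of_pos hpos]
      exact Int.emod_lt_of_pos _ hpos
    have hs0 : 0 ≤ s := by
      rw [hs, PySem.Int.floordiv_eq_ediv_of_pos hpos]
      exact Int.ediv_nonneg (by positivity) (by omega)
    have h0 : pvBound s r 0 = 0 := by unfold pvBound; omega
    have key := pvLoop_inv matrix s r 0 num_slaves []
    rw [h0] at key
    rw [key, List.nil_append]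
    have hgo := pvGoB_inv matrix n num_slaves s r hpos hsr hr0 hrn hs0 0 le_rfl (by omega) []
    rw [h0] at hgo
    simp only [Int.toNat_zero, List.drop_zero, List.map_id', sub_zero, List.nil_append] at hgo
    rw [hgo]
  · rw [PySem.List.pyRange_one_eq_nil (show num_slaves ≤ (0:Int) by omega),
        PySem.List.pyRange_neg_one_eq_nil (show num_slaves ≤ (0:Int) by omega)]
    simp
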